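-- pv_equiv track=rewrite | github.com/rexgarland/markdown-plan | src/mdplan/parse.py | get_initial_white
-- ===== SOURCE A (Python) =====
-- WHITESPACE = [' ','\t']
--
-- def get_initial_white(string):
--     text = ''
--     for char in string:
--         if char in WHITESPACE:
--             text += char
--         else:
--             return text
--     return ''
-- ===== SOURCE B (Python) =====
-- def get_initial_white(string):
--     stripped = string.lstrip(' \t')
--     if not stripped:
--         return ''
--     return string[:len(string) - len(stripped)]
-- ===== Notes on version B (the rewrite author's own statement) =====
-- stated objective: idiomatic
-- what changed: Replaces the explicit char loop with accumulator by str.lstrip plus a length-difference slice (the all-whitespace/empty case returns '' in both).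
import Mathlib
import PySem

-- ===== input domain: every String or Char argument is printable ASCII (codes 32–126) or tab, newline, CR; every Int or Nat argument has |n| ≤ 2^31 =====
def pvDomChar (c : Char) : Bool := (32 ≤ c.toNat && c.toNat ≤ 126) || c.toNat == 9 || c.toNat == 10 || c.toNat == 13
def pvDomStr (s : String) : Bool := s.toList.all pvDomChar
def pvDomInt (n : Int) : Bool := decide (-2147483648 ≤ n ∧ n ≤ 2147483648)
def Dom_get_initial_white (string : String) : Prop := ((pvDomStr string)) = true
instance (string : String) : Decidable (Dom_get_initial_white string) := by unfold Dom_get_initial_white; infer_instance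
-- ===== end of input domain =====

-- B replaces A's char loop + accumulator by lstrip and a length-difference prefix (idiomatic; same value everywhere).
-- ===== PORT A =====
def pvWs (c : Char) : Bool := c = ' ' || c = '\t'

-- 'for char in string: if char in WHITESPACE: text += char else: return text / return \'\''
def getInitialWhiteGo (text : List Char) (l : List Char) : List Char :=
  match l with
  | [] => []
  | c :: cs => if pvWs c then getInitialWhiteGo (text ++ [c]) cs else text

def get_initial_white (string : String) : String :=
  String.ofList (getInitialWhiteGo [] string.toList)

-- ===== PORT B =====
def get_initial_white_alt (string : String) : String :=
  -- stripped = string.lstrip(' \t'), ported by hand as dropWhile over these two chars (exact)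
  if string.toList.dropWhile pvWs = [] then ""
  else
    -- string[:len(string) - len(stripped)]: 0 ≤ bound ≤ len, so the slice is List.take (exact here)
    String.ofList (string.toList.take (string.toList.length - (string.toList.dropWhile pvWs).length))

-- ===== PRECONDITION & SPEC =====
def Spec_get_initial_white (string : String) (out : String) : Prop := out = get_initial_white_alt string
instance (string : String) (out : String) : Decidable (Spec_get_initial_white string out) := by unfold Spec_get_initial_white; infer_instance

-- ===== CLAIM =====
def Claim_equal_get_initial_white : Prop := ∀ (string : String), Dom_get_initial_white string → Spec_get_initial_white string (get_initial_white string)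

-- ===== LEMMAS AND PROOFS =====
theorem goA_eq (l : List Char) : ∀ (acc : List Char),
    getInitialWhiteGo acc l = if l.dropWhile pvWs = [] then [] else acc ++ l.takeWhile pvWs := by
  induction l with
  | nil => intro acc; simp [getInitialWhiteGo]
  | cons c cs ih =>
    intro acc
    by_cases h : pvWs c = true
    · simp [getInitialWhiteGo, h, ih]
    · simp [getInitialWhiteGo, h]

theorem take_sub_eq_takeWhile (l : List Char) :
    l.take (l.length - (l.dropWhile pvWs).length) = l.takeWhile pvWs := by
  have h1 : (l.takeWhile pvWs).length + (l.dropWhile pvWs).length = l.length := by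
    rw [← List.length_append, List.takeWhile_append_dropWhile]
  have hlen : l.length - (l.dropWhile pvWs).length = (l.takeWhile pvWs).length := by omega
  rw [hlen]
  have hp : l.takeWhile pvWs <+: l := List.takeWhile_prefix pvWs
  exact (List.prefix_iff_eq_take.mp hp).symm

-- ===== VERDICT =====
theorem get_initial_white_spec : Claim_equal_get_initial_white := by
  intro s _
  unfold Spec_get_initial_white get_initial_white get_initial_white_alt
  rw [goA_eq]
  by_cases h : s.toList.dropWhile pvWs = []
  · rw [if_pos h, if_pos h]
  · rw [if_neg h, if_neg h, List.nil_append, take_sub_eq_takeWhile]
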